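-- pv_equiv track=rewrite | github.com/stu-basement/AdventOfCode2024 | day12/day12.py | printRegion
-- ===== SOURCE A (Python) =====
-- def regionBoundingBox(region):
--     bottomLeftX = min(point[0] for point in region)
--     bottomLeftY = min(point[1] for point in region)
--     topRightX = max(point[0] for point in region)
--     topRightY = max(point[1] for point in region)
--
--     return (bottomLeftX, bottomLeftY), (topRightX, topRightY)
--
-- def printRegion(region):
--     regionMap = []
--
--     bottomLeft, topRight = regionBoundingBox(region)
--     for i in range(abs(topRight[1] - bottomLeft[1]) + 1):
--         regionMap.append(list(''.ljust(abs(topRight[0] - bottomLeft[0]) + 1, '.')))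
--
--     pointIter = iter(region)
--     r = next(pointIter, None)
--     while (r != None):
--         regionMap[r[1] - bottomLeft[1]][r[0] - bottomLeft[0]] = r[2]
--         r = next(pointIter, None)
--
--     return regionMap
--
-- regionMap = []
-- ===== SOURCE B (Python) =====
-- def printRegion(region):
--     bottomLeftX = min(p[0] for p in region)
--     bottomLeftY = min(p[1] for p in region)
--     topRightX = max(p[0] for p in region)
--     topRightY = max(p[1] for p in region)
--     grid_chars = {(p[0], p[1]): p[2] for p in region}
--     width = topRightX - bottomLeftX + 1
--     height = topRightY - bottomLeftY + 1
--     return [[grid_chars.get((col + bottomLeftX, row + bottomLeftY), '.')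
--              for col in range(width)]
--             for row in range(height)]
-- ===== Notes on version B (the rewrite author's own statement) =====
-- stated objective: idiomatic
-- what changed: Replaces the build-default-grid-then-overwrite-points loop by a coordinate-indexed dict built once and a cell-major nested comprehension that looks each cell up (last duplicate wins in both).
import Mathlib
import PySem

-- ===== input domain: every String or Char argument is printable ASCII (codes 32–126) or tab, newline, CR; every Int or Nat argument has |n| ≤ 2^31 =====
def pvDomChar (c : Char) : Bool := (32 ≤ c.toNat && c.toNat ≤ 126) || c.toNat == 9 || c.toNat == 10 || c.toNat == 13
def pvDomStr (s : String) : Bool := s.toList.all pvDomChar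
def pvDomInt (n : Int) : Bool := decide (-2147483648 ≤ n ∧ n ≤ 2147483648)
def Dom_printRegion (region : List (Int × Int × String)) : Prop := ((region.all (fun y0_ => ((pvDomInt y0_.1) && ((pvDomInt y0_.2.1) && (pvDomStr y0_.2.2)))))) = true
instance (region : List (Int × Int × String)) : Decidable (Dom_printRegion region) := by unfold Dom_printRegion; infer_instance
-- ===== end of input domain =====

-- B replaces A's build-default-grid-then-overwrite-points loop by a coordinate-keyed dict
-- built once plus a cell-major nested lookup comprehension (idiomatic; same cost).

-- ===== PORT A =====
-- regionBoundingBox: Python min/max of an empty sequence raise ValueError; Pre_ excludes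
-- region = [], so the `.getD 0` defaults below are never reached.
def pvBBox (region : List (Int × Int × String)) : (Int × Int) × (Int × Int) :=
  (((PySem.List.min? (region.map (fun p => p.1)) (fun x => x)).getD 0,
    (PySem.List.min? (region.map (fun p => p.2.1)) (fun x => x)).getD 0),
   ((PySem.List.max? (region.map (fun p => p.1)) (fun x => x)).getD 0,
    (PySem.List.max? (region.map (fun p => p.2.1)) (fun x => x)).getD 0))

-- `list(''.ljust(k, '.'))` is k copies of ".", ported as List.replicate.
-- `regionMap[r[1]-bY][r[0]-bX] = r[2]`: under Pre_ both indices are provably ≥ 0 and in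
-- range (they lie inside the bounding box), so Int.toNat + List.modify/set is exact here.
def printRegion (region : List (Int × Int × String)) : List (List String) :=
  let bb := pvBBox region
  let bottomLeft := bb.1
  let topRight := bb.2
  let regionMap : List (List String) :=
    (List.range ((topRight.2 - bottomLeft.2).natAbs + 1)).foldl
      (fun acc _ => acc ++ [List.replicate ((topRight.1 - bottomLeft.1).natAbs + 1) "."]) []
  region.foldl
    (fun m r => m.modify (r.2.1 - bottomLeft.2).toNat
      (fun row => row.set (r.1 - bottomLeft.1).toNat r.2.2)) regionMap

-- ===== PORT B =====
def printRegion_alt (region : List (Int × Int × String)) : List (List String) :=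
  let bottomLeftX := (PySem.List.min? (region.map (fun p => p.1)) (fun x => x)).getD 0
  let bottomLeftY := (PySem.List.min? (region.map (fun p => p.2.1)) (fun x => x)).getD 0
  let topRightX := (PySem.List.max? (region.map (fun p => p.1)) (fun x => x)).getD 0
  let topRightY := (PySem.List.max? (region.map (fun p => p.2.1)) (fun x => x)).getD 0
  let gridChars : PySem.Dict (Int × Int) String :=
    region.foldl (fun d p => d.insert (p.1, p.2.1) p.2.2) PySem.Dict.empty
  (PySem.List.pyRange 0 (topRightY - bottomLeftY + 1) 1).map (fun row =>
    (PySem.List.pyRange 0 (topRightX - bottomLeftX + 1) 1).map (fun col =>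
      gridChars.getD (col + bottomLeftX, row + bottomLeftY) "."))

-- ===== PRECONDITION & SPEC =====
-- Pre_ excludes only region = [], where Python's min() raises ValueError (B raises too).
def Pre_printRegion (region : List (Int × Int × String)) : Prop := region ≠ []
instance (region : List (Int × Int × String)) : Decidable (Pre_printRegion region) := by unfold Pre_printRegion; infer_instance
def pvWitness_printRegion : (List (Int × Int × String)) := [(0, 0, "A"), (1, 0, "A")]

def Spec_printRegion (region : List (Int × Int × String)) (out : List (List String)) : Prop := out = printRegion_alt region
instance (region : List (Int × Int × String)) (out : List (List String)) : Decidable (Spec_printRegion region out) := by unfold Spec_printRegion; infer_instance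

-- ===== CLAIM (what is proved, stated in full; the proofs are below) =====
def Claim_equal_printRegion : Prop := ∀ (region : List (Int × Int × String)), Dom_printRegion region → Pre_printRegion region → Spec_printRegion region (printRegion region)

-- ===== LEMMAS AND PROOFS =====

-- The core invariant: placing points one by one into the all-'.' grid equals, cell by cell,
-- looking the cell up in the insert-fold dict (last write wins on both sides).
lemma pv_grid_fold_eq (bx by_ tx ty : Int)
    (pts : List (Int × Int × String))
    (hb : ∀ p ∈ pts, bx ≤ p.1 ∧ p.1 ≤ tx ∧ by_ ≤ p.2.1 ∧ p.2.1 ≤ ty) :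
    pts.foldl
      (fun m r => m.modify (r.2.1 - by_).toNat
        (fun row => row.set (r.1 - bx).toNat r.2.2))
      (List.replicate ((ty - by_).toNat + 1) (List.replicate ((tx - bx).toNat + 1) "."))
    = (List.range ((ty - by_).toNat + 1)).map (fun (row : Nat) =>
        (List.range ((tx - bx).toNat + 1)).map (fun (col : Nat) =>
          (pts.foldl (fun d p => d.insert (p.1, p.2.1) p.2.2) PySem.Dict.empty).getD
            (((col : Nat) : Int) + bx, ((row : Nat) : Int) + by_) ".")) := by
  induction pts using List.reverseRecOn with
  | nil =>
      simp [PySem.Dict.getD_empty, List.map_const']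
  | append_singleton l p IH =>
      have hbl : ∀ q ∈ l, bx ≤ q.1 ∧ q.1 ≤ tx ∧ by_ ≤ q.2.1 ∧ q.2.1 ≤ ty := by
        intro q hq; exact hb q (List.mem_append_left _ hq)
      have hbp := hb p (by simp)
      simp only [List.foldl_append, List.foldl_cons, List.foldl_nil]
      rw [IH hbl]
      obtain ⟨hb1, hb2, hb3, hb4⟩ := hbp
      apply List.ext_getElem
      · simp
      · intro r h1 h2
        have hr : r < (ty - by_).toNat + 1 := by simpa using h2
        rw [List.getElem_modify]
        simp only [List.getElem_map, List.getElem_range]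
        by_cases hrow : (p.2.1 - by_).toNat = r
        · rw [if_pos hrow]
          apply List.ext_getElem
          · simp
          · intro c hc1 hc2
            have hcw : c < (tx - bx).toNat + 1 := by simpa using hc2
            rw [List.getElem_set]
            simp only [List.getElem_map, List.getElem_range,
              PySem.Dict.getD_insert, Prod.mk.injEq]
            by_cases hcol : (p.1 - bx).toNat = c
            · rw [if_pos hcol, if_pos ⟨by omega, by omega⟩]
            · rw [if_neg hcol, if_neg]
              rintro ⟨h1', h2'⟩
              omega
        · rw [if_neg hrow]
          apply List.map_congr_left
          intro c hc
          have hcw : c < (tx - bx).toNat + 1 := List.mem_range.mp hc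
          rw [PySem.Dict.getD_insert, if_neg]
          intro h'
          rw [Prod.mk.injEq] at h'
          omega

-- ===== VERDICT (by name: the statement is the Claim_ definition above) =====
theorem printRegion_spec : Claim_equal_printRegion := by
  intro region _hdom hpre
  unfold Spec_printRegion
  obtain ⟨p0, rest, rfl⟩ : ∃ p0 rest, region = p0 :: rest := by
    cases region with
    | nil => exact absurd rfl hpre
    | cons a t => exact ⟨a, t, rfl⟩
  set region := p0 :: rest with hreg
  -- the four extrema exist
  obtain ⟨bx, hbx⟩ : ∃ m, PySem.List.min? (region.map (fun p => p.1)) (fun x => x) = some m := by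
    cases h : PySem.List.min? (region.map (fun p => p.1)) (fun x => x) with
    | none => rw [PySem.List.min?_eq_none_iff] at h; simp [hreg] at h
    | some m => exact ⟨m, rfl⟩
  obtain ⟨by_, hby⟩ : ∃ m, PySem.List.min? (region.map (fun p => p.2.1)) (fun x => x) = some m := by
    cases h : PySem.List.min? (region.map (fun p => p.2.1)) (fun x => x) with
    | none => rw [PySem.List.min?_eq_none_iff] at h; simp [hreg] at h
    | some m => exact ⟨m, rfl⟩
  obtain ⟨tx, htx⟩ : ∃ m, PySem.List.max? (region.map (fun p => p.1)) (fun x => x) = some m := by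
    cases h : PySem.List.max? (region.map (fun p => p.1)) (fun x => x) with
    | none => rw [PySem.List.max?_eq_none_iff] at h; simp [hreg] at h
    | some m => exact ⟨m, rfl⟩
  obtain ⟨ty, hty⟩ : ∃ m, PySem.List.max? (region.map (fun p => p.2.1)) (fun x => x) = some m := by
    cases h : PySem.List.max? (region.map (fun p => p.2.1)) (fun x => x) with
    | none => rw [PySem.List.max?_eq_none_iff] at h; simp [hreg] at h
    | some m => exact ⟨m, rfl⟩
  have hbnd : ∀ p ∈ region, bx ≤ p.1 ∧ p.1 ≤ tx ∧ by_ ≤ p.2.1 ∧ p.2.1 ≤ ty := by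
    intro p hp
    refine ⟨PySem.List.min?_isMin hbx _ (List.mem_map_of_mem hp),
            PySem.List.max?_isMax htx _ (List.mem_map_of_mem hp),
            PySem.List.min?_isMin hby _ (List.mem_map_of_mem hp),
            PySem.List.max?_isMax hty _ (List.mem_map_of_mem hp)⟩
  have hp0 := hbnd p0 (by simp [hreg])
  have hx : bx ≤ tx := le_trans hp0.1 hp0.2.1
  have hy : by_ ≤ ty := le_trans hp0.2.2.1 hp0.2.2.2
  unfold printRegion printRegion_alt pvBBox
  simp only [hbx, hby, htx, hty, Option.getD_some]
  -- initial grid is replicate × replicate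
  rw [PySem.List.foldl_append_singleton_eq_map, List.nil_append, List.map_const',
    List.length_range]
  have hna1 : (tx - bx).natAbs = (tx - bx).toNat := by omega
  have hna2 : (ty - by_).natAbs = (ty - by_).toNat := by omega
  rw [hna1, hna2, pv_grid_fold_eq bx by_ tx ty region hbnd]
  -- B side: pyRange → range
  have hw : (tx - bx + 1 : Int) = (((tx - bx).toNat + 1 : Nat) : Int) := by omega
  have hh : (ty - by_ + 1 : Int) = (((ty - by_).toNat + 1 : Nat) : Int) := by omega
  rw [hw, hh]
  simp only [PySem.List.pyRange_zero_natCast, List.map_map]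
  rfl
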